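-- pv_equiv track=rewrite | github.com/abhishyam21/python_learning | lists/Problem51to60.py | list_slice1
-- ===== SOURCE A (Python) =====
-- def list_slice1(input, n):
--     res = []
--     for i in range(n):
--         temp = []
--         for j in range(i, len(input), n):
--             temp.append(input[j])
--         res.append(temp)
--     return res
-- ===== SOURCE B (Python) =====
-- def list_slice1(input, n):
--     res = [[] for _ in range(n)]
--     if n > 0:
--         for idx, val in enumerate(input):
--             res[idx % n].append(val)
--     return res
-- ===== Notes on version B (the rewrite author's own statement) =====
-- stated objective: alternative
-- what changed: Replaces A's nested loops (for each of the n buckets, a strided scan over the input) with a single pass over the input that appends each element to a pre-allocated bucket selected by index mod n, guarded by n > 0 so that n <= 0 still yields [].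
import Mathlib
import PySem

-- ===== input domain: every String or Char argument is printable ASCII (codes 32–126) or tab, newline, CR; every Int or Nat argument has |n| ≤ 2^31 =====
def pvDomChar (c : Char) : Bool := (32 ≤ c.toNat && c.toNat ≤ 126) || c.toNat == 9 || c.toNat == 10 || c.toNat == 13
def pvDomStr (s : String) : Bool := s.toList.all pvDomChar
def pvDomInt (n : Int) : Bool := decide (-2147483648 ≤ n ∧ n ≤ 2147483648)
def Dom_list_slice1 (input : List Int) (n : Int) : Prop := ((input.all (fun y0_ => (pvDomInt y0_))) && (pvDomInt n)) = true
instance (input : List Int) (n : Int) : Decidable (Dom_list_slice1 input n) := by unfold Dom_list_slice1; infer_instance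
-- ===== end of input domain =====

-- B replaces A's nested outer-over-buckets / inner-strided-scan with one pre-allocated
-- bucket list and a single pass over the input appending each element to bucket idx % n.

-- ===== PORT A =====
def list_slice1 (input : List Int) (n : Int) : List (List Int) :=
  (PySem.List.pyRange 0 n 1).foldl
    (fun res i =>
      res ++ [(PySem.List.pyRange i (input.length : Int) n).foldl
                (fun temp j => temp ++ [PySem.List.pyGetD input j 0]) []])
    []

-- ===== PORT B =====
def list_slice1_alt (input : List Int) (n : Int) : List (List Int) :=
  let res : List (List Int) := List.replicate n.toNat []
  if 0 < n then
    (PySem.List.enumerate input).foldl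
      (fun res p => res.modify (PySem.Int.mod p.1 n).toNat (fun b => b ++ [p.2])) res
  else res

-- ===== PRECONDITION & SPEC =====
def Spec_list_slice1 (input : List Int) (n : Int) (out : List (List Int)) : Prop := out = list_slice1_alt input n
instance (input : List Int) (n : Int) (out : List (List Int)) : Decidable (Spec_list_slice1 input n out) := by unfold Spec_list_slice1; infer_instance

-- ===== CLAIM (what is proved, stated in full; the proofs are below) =====
def Claim_equal_list_slice1 : Prop := ∀ (input : List Int) (n : Int), Dom_list_slice1 input n → Spec_list_slice1 input n (list_slice1 input n)

-- ===== LEMMAS AND PROOFS =====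

-- elements of xs at (relative) positions ≡ r (mod m), by a rotating counter
def pvPick : List Int → Nat → Nat → List Int
  | [], _, _ => []
  | x :: t, 0, m => x :: pvPick t (m-1) m
  | _ :: t, r+1, m => pvPick t r m

lemma pvSuccMod (L m : Nat) (hm : 0 < m) :
    (L + 1) % m = if L % m = m - 1 then 0 else L % m + 1 := by
  have ha : L % m < m := Nat.mod_lt _ hm
  have hL : L % m + m * (L / m) = L := Nat.mod_add_div L m
  by_cases h : L % m = m - 1
  · rw [if_pos h]
    have hx : L + 1 = m * (L / m) + m := by omega
    rw [hx, Nat.mul_add_mod, Nat.mod_self]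
  · have hlt : L % m + 1 < m := by omega
    have hx : L + 1 = (L % m + 1) + m * (L / m) := by omega
    rw [hx, if_neg h, Nat.add_mul_mod_self_left, Nat.mod_eq_of_lt hlt]

lemma pvPick_snoc (x : Int) (m : Nat) (hm : 0 < m) :
    ∀ (xs : List Int) (r : Nat), r < m →
      pvPick (xs ++ [x]) r m = pvPick xs r m ++ (if xs.length % m = r then [x] else []) := by
  intro xs
  induction xs with
  | nil =>
    intro r _
    match r with
    | 0 => simp [pvPick, Nat.zero_mod]
    | r + 1 => simp [pvPick, Nat.zero_mod]
  | cons y t ih =>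
    intro r hr
    have h2 := pvSuccMod t.length m hm
    have ha : t.length % m < m := Nat.mod_lt _ hm
    cases r with
    | zero =>
      simp only [List.cons_append, pvPick, ih (m - 1) (by omega), List.length_cons]
      by_cases hc : t.length % m = m - 1
      · have hz : (t.length + 1) % m = 0 := by rw [h2, if_pos hc]
        rw [if_pos hc, if_pos hz]
      · have hz : ¬ (t.length + 1) % m = 0 := by rw [h2, if_neg hc]; omega
        rw [if_neg hc, if_neg hz]
    | succ r =>
      simp only [List.cons_append, pvPick, ih r (by omega), List.length_cons]
      by_cases hc : t.length % m = r
      · have hz : (t.length + 1) % m = r + 1 := by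
          rw [h2, if_neg (by omega : ¬ t.length % m = m - 1)]; omega
        rw [if_pos hc, if_pos hz]
      · have hz : ¬ (t.length + 1) % m = r + 1 := by
          rw [h2]
          by_cases hd : t.length % m = m - 1
          · rw [if_pos hd]; omega
          · rw [if_neg hd]; omega
        rw [if_neg hc, if_neg hz]

lemma pvRange_nil (a b s : Int) (hs : 0 < s) (h : b ≤ a) :
    PySem.List.pyRange a b s = [] := by
  rw [PySem.List.pyRange_of_pos _ _ hs, if_neg (by omega)]
  simp

lemma pvRange_shift (a b s : Int) (hs : 0 < s) :
    PySem.List.pyRange (a + 1) (b + 1) s = (PySem.List.pyRange a b s).map (· + 1) := by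
  rw [PySem.List.pyRange_of_pos _ _ hs, PySem.List.pyRange_of_pos _ _ hs, List.map_map]
  have hco : (if a + 1 < b + 1 then ((b + 1 - (a + 1) + s - 1) / s).toNat else 0)
      = (if a < b then ((b - a + s - 1) / s).toNat else 0) := by
    have h2 : b + 1 - (a + 1) + s - 1 = b - a + s - 1 := by ring
    rw [h2]
    split_ifs with hx hy
    · rfl
    · omega
    · omega
    · rfl
  rw [hco]
  apply List.map_congr_left
  intro k _
  simp only [Function.comp_apply]
  ring

lemma pvRange_cons (a b s : Int) (hs : 0 < s) (h : a < b) :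
    PySem.List.pyRange a b s = a :: PySem.List.pyRange (a + s) b s := by
  rw [PySem.List.pyRange_of_pos _ _ hs, PySem.List.pyRange_of_pos _ _ hs, if_pos h]
  have hkey : b - a + s - 1 = (b - a - 1) + 1 * s := by ring
  have hdiv : (b - a + s - 1) / s = (b - a - 1) / s + 1 := by
    rw [hkey, Int.add_mul_ediv_right _ _ (by omega : s ≠ 0)]
  have hnn : 0 ≤ (b - a - 1) / s := Int.ediv_nonneg (by omega) (by omega)
  have hcount : ((b - a + s - 1) / s).toNat
      = (if a + s < b then ((b - (a + s) + s - 1) / s).toNat else 0) + 1 := by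
    by_cases hab : a + s < b
    · rw [if_pos hab, hdiv]
      have hx : b - (a + s) + s - 1 = b - a - 1 := by ring
      rw [hx]
      omega
    · rw [if_neg hab, hdiv]
      have hz : (b - a - 1) / s = 0 := Int.ediv_eq_zero_of_lt (by omega) (by omega)
      rw [hz]
      omega
  rw [hcount, List.range_succ_eq_map, List.map_cons, List.map_map]
  congr 1
  · push_cast
    ring
  · apply List.map_congr_left
    intro k _
    simp only [Function.comp_apply, Nat.succ_eq_add_one]
    push_cast
    ring

lemma pvGetD_cons_succ (x : Int) (t : List Int) (j : Int) (hj : 0 ≤ j) :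
    PySem.List.pyGetD (x :: t) (j + 1) 0 = PySem.List.pyGetD t j 0 := by
  obtain ⟨k, rfl⟩ := Int.eq_ofNat_of_zero_le hj
  have h1 : (k : Int) + 1 = ((k + 1 : Nat) : Int) := by push_cast; ring
  rw [h1, PySem.List.pyGetD_natCast, PySem.List.pyGetD_natCast]
  rfl

lemma pvBucketA (m : Nat) (hm : 0 < m) :
    ∀ (xs : List Int) (r : Nat), r < m →
      (PySem.List.pyRange (r : Int) (xs.length : Int) (m : Int)).map
        (fun j => PySem.List.pyGetD xs j 0) = pvPick xs r m := by
  intro xs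
  induction xs with
  | nil =>
    intro r _
    rw [pvRange_nil _ _ _ (by exact_mod_cast hm) (by simp)]
    rfl
  | cons x t ih =>
    intro r hr
    have hlen : ((x :: t).length : Int) = (t.length : Int) + 1 := by simp
    have htail : ∀ (a : Int), 0 ≤ a →
        (PySem.List.pyRange (a + 1) ((t.length : Int) + 1) (m : Int)).map
          (fun j => PySem.List.pyGetD (x :: t) j 0)
        = (PySem.List.pyRange a (t.length : Int) (m : Int)).map
          (fun j => PySem.List.pyGetD t j 0) := by
      intro a ha
      rw [pvRange_shift _ _ _ (by exact_mod_cast hm), List.map_map]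
      apply List.map_congr_left
      intro j hj
      have hja : a ≤ j := ((PySem.List.mem_pyRange_iff_of_pos (by exact_mod_cast hm) j).mp hj).1
      simp only [Function.comp_apply]
      exact pvGetD_cons_succ x t j (by omega)
    cases r with
    | zero =>
      rw [hlen]
      rw [show (((0 : Nat) : Int)) = (0 : Int) from rfl]
      rw [pvRange_cons 0 _ _ (by exact_mod_cast hm) (by omega), List.map_cons]
      have h0m : (0 : Int) + (m : Int) = ((m - 1 : Nat) : Int) + 1 := by omega
      rw [h0m, htail _ (by omega), ih (m - 1) (by omega)]
      rw [PySem.List.pyGetD_of_nonneg _ _ (le_refl (0 : Int))]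
      rfl
    | succ r =>
      rw [hlen]
      rw [show (((r + 1 : Nat) : Int)) = ((r : Nat) : Int) + 1 by push_cast; ring]
      rw [htail _ (by omega), ih r (by omega)]
      rfl

lemma pvBfold (m : Nat) (hm : 0 < m) (input : List Int) :
    (PySem.List.enumerate input).foldl
      (fun res p => res.modify (PySem.Int.mod p.1 (m : Int)).toNat (fun b => b ++ [p.2]))
      (List.replicate m [])
    = (List.range m).map (fun r => pvPick input r m) := by
  induction input using List.reverseRecOn with
  | nil =>
    simp [PySem.List.enumerate_nil, pvPick, List.map_const']
  | append_singleton xs x ih =>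
    have he : PySem.List.enumerate (xs ++ [x])
        = PySem.List.enumerate xs ++ [((xs.length : Int), x)] := by
      rw [PySem.List.enumerate_append, PySem.List.enumerate_cons, PySem.List.enumerate_nil]
      norm_num
    rw [he, List.foldl_append, ih]
    simp only [List.foldl_cons, List.foldl_nil]
    have hmod : (PySem.Int.mod (xs.length : Int) (m : Int)).toNat = xs.length % m := by
      have h1 : PySem.Int.mod (xs.length : Int) (m : Int) = ((xs.length % m : Nat) : Int) := by
        unfold PySem.Int.mod
        rw [Int.fmod_eq_emod, if_pos (Or.inl (by positivity))]
        omega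
      rw [h1, Int.toNat_natCast]
    rw [hmod]
    apply List.ext_getElem
    · simp
    · intro i h1 h2
      have him : i < m := by simpa using h2
      rw [List.getElem_modify]
      simp only [List.getElem_map, List.getElem_range]
      rw [pvPick_snoc x m hm xs i him]
      split_ifs <;> simp

-- ===== VERDICT (by name: the statement is the Claim_ definition above) =====
theorem list_slice1_spec : Claim_equal_list_slice1 := by
  intro input n _
  unfold Spec_list_slice1 list_slice1
  simp only [list_slice1_alt]
  by_cases hn : 0 < n
  · have hm : 0 < n.toNat := by omega
    have hcast : ((n.toNat : Nat) : Int) = n := Int.toNat_of_nonneg (by omega)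
    rw [← hcast]
    simp only [Int.toNat_natCast]
    rw [if_pos (by exact_mod_cast hm : (0 : Int) < (n.toNat : Int))]
    rw [PySem.List.foldl_append_singleton_eq_map
      (fun i => (PySem.List.pyRange i (input.length : Int) (n.toNat : Int)).foldl
        (fun temp j => temp ++ [PySem.List.pyGetD input j 0]) [])]
    rw [List.nil_append]
    rw [PySem.List.pyRange_zero_natCast, List.map_map]
    rw [pvBfold n.toNat hm input]
    apply List.map_congr_left
    intro r hr
    have hrm : r < n.toNat := List.mem_range.mp hr
    simp only [Function.comp_apply]
    rw [PySem.List.foldl_append_singleton_eq_map (fun j => PySem.List.pyGetD input j 0),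
      List.nil_append]
    exact pvBucketA n.toNat hm input r hrm
  · have h0 : n.toNat = 0 := by omega
    rw [if_neg hn, h0]
    rw [PySem.List.pyRange_one_eq_nil (by omega)]
    rfl
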